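-- pv_equiv track=rewrite | github.com/MubarakAd/A2SV-CP | Python-Track/distance-between-bus-stops.py | distanceBetweenBusStops
-- ===== SOURCE A (Python) =====
-- from typing import List
--
-- def distanceBetweenBusStops(distance: List[int], start: int, destination: int) -> int:
--     sum=0
--     _all=0
--     if start>destination:
--         for i in range(start-1,destination-1,-1):
--             sum+=distance[i]
--     else:
--         for i in range(start,destination):
--             sum+=distance[i]
--     for i in range(len(distance)):
--         _all+=distance[i]
--     result=min(sum,_all-sum)
--     return result
-- ===== SOURCE B (Python) =====
-- from typing import List
--
-- def distanceBetweenBusStops(distance: List[int], start: int, destination: int) -> int: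
--     lo, hi = sorted((start, destination))
--     prefix = [0]
--     for d in distance:
--         prefix.append(prefix[-1] + d)
--     arc = prefix[hi] - prefix[lo]
--     return min(arc, prefix[-1] - arc)
-- ===== Notes on version B (the rewrite author's own statement) =====
-- stated objective: alternative
-- what changed: B builds a prefix-sum table in one pass and reads both arc lengths from it by O(1) index lookups (arc = prefix[hi]-prefix[lo], other = prefix[-1]-arc); A instead sums one arc element by element and then sums the whole array in a second loop. Pre_ keeps stop indices in [0, len] plus equal-stops inputs both accept; it excludes indices above len (A raises IndexError, except a far-out equal-stops case where A returns a value for a nonexistent stop) and unequal negative stops (A's accidental negative-index wraparound).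
-- outside the precondition, e.g. on distanceBetweenBusStops([1, 2], -1, 1): A returns 0, B returns -2; on distanceBetweenBusStops([1, 2], 5, 5): A returns 0, B raises IndexError
import Mathlib
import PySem

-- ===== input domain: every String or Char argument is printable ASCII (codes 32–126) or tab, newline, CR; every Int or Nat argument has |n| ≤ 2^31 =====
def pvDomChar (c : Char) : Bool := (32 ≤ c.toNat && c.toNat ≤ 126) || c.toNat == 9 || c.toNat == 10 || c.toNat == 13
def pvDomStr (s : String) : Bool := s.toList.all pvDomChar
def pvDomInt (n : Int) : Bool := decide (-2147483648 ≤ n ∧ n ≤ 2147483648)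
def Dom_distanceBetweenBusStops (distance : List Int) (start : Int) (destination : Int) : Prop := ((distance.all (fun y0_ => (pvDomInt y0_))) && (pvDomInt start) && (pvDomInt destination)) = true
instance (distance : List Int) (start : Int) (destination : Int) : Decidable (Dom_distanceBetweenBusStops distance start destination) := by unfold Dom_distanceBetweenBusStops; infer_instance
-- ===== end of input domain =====

-- B builds a prefix-sum table once and reads both arc lengths from it by index lookups;
-- A sums one arc element by element and the whole array in a second loop (alternative
-- decomposition, same asymptotic cost).

-- ===== PORT A =====
-- 'distance[i]' is PySem.List.pyGetD distance i 0; under Pre_ every accessed index is in range.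
def distanceBetweenBusStops (distance : List Int) (start : Int) (destination : Int) : Int :=
  let s :=
    if start > destination then
      (PySem.List.pyRange (start - 1) (destination - 1) (-1)).foldl
        (fun acc i => acc + PySem.List.pyGetD distance i 0) 0
    else
      (PySem.List.pyRange start destination 1).foldl
        (fun acc i => acc + PySem.List.pyGetD distance i 0) 0
  let all :=
    (PySem.List.pyRange 0 (distance.length : Int) 1).foldl
      (fun acc i => acc + PySem.List.pyGetD distance i 0) 0
  min s (all - s)

-- ===== PORT B =====
-- 'lo, hi = sorted((start, destination))' on a pair is min/max; the prefix loop appends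
-- prefix[-1] + d each step; prefix[hi], prefix[lo], prefix[-1] are pyGetD lookups.
def distanceBetweenBusStops_alt (distance : List Int) (start : Int) (destination : Int) : Int :=
  let lo := min start destination
  let hi := max start destination
  let pre := distance.foldl (fun p d => p ++ [PySem.List.pyGetD p (-1) 0 + d]) [(0 : Int)]
  let arc := PySem.List.pyGetD pre hi 0 - PySem.List.pyGetD pre lo 0
  min arc (PySem.List.pyGetD pre (-1) 0 - arc)

-- ===== PRECONDITION & SPEC =====
-- Pre_ keeps both stop indices in [0, len] (the natural domain of stop positions), plus the
-- degenerate equal-stops inputs both programs accept. It excludes inputs with an index above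
-- len (A raises IndexError there, except the accidental far-out equal-stops case where A
-- returns a value for a nonexistent stop) and unequal negative stop indices (A returns a value
-- produced by Python's accidental negative-index wraparound).
def Pre_distanceBetweenBusStops (distance : List Int) (start : Int) (destination : Int) : Prop :=
  (0 ≤ min start destination ∧ max start destination ≤ (distance.length : Int)) ∨
  (start = destination ∧ -((distance.length : Int) + 1) ≤ start ∧ start ≤ (distance.length : Int))

instance (distance : List Int) (start : Int) (destination : Int) : Decidable (Pre_distanceBetweenBusStops distance start destination) := by unfold Pre_distanceBetweenBusStops; infer_instance

def pvWitness_distanceBetweenBusStops : List Int × Int × Int := ([1, 2, 3, 4], 3, 1)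

def Spec_distanceBetweenBusStops (distance : List Int) (start : Int) (destination : Int) (out : Int) : Prop := out = distanceBetweenBusStops_alt distance start destination
instance (distance : List Int) (start : Int) (destination : Int) (out : Int) : Decidable (Spec_distanceBetweenBusStops distance start destination out) := by unfold Spec_distanceBetweenBusStops; infer_instance

-- ===== CLAIM (what is proved, stated in full; the proofs are below) =====
def Claim_equal_distanceBetweenBusStops : Prop := ∀ (distance : List Int) (start : Int) (destination : Int), Dom_distanceBetweenBusStops distance start destination → Pre_distanceBetweenBusStops distance start destination → Spec_distanceBetweenBusStops distance start destination (distanceBetweenBusStops distance start destination)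

-- ===== LEMMAS AND PROOFS =====

-- A's accumulating loop is init + sum of the mapped list.
theorem pv_foldl_add (g : Int → Int) (l : List Int) (init : Int) :
    l.foldl (fun acc i => acc + g i) init = init + (l.map g).sum := by
  induction l generalizing init with
  | nil => simp
  | cons x xs ih => simp [List.foldl, ih]; ring

-- B's prefix loop, characterized: starting from p ++ [s] it appends the running sums s + Σ.
theorem pv_prefix_loop (l : List Int) (p : List Int) (s : Int) :
    l.foldl (fun q d => q ++ [PySem.List.pyGetD q (-1) 0 + d]) (p ++ [s])
      = (p ++ [s]) ++ (List.range l.length).map (fun k => s + (l.take (k + 1)).sum) := by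
  induction l generalizing p s with
  | nil => simp
  | cons d ds ih =>
      simp only [List.foldl_cons, PySem.List.pyGetD_neg_one_append_singleton]
      have h := ih (p ++ [s]) (s + d)
      rw [List.append_assoc] at h ⊢
      rw [h, List.length_cons, List.range_succ_eq_map, List.map_cons, List.map_map]
      simp [List.take_succ_cons, Function.comp]
      intro a _
      ring

-- The prefix table is the list of partial sums.
theorem pv_prefix (distance : List Int) :
    distance.foldl (fun q d => q ++ [PySem.List.pyGetD q (-1) 0 + d]) [(0 : Int)]
      = (List.range (distance.length + 1)).map (fun k => (distance.take k).sum) := by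
  have h := pv_prefix_loop distance [] 0
  simp only [List.nil_append] at h
  rw [h, List.range_succ_eq_map, List.map_cons, List.map_map]
  simp [Function.comp]

-- Reading the prefix table at an in-range index.
theorem pv_prefix_get (distance : List Int) (i : Int) (h0 : 0 ≤ i)
    (h1 : i ≤ (distance.length : Int)) :
    PySem.List.pyGetD ((List.range (distance.length + 1)).map (fun k => (distance.take k).sum)) i 0
      = (distance.take i.toNat).sum := by
  rw [PySem.List.pyGetD_eq_getElem _ _ h0 (by simp; omega)]
  simp

-- Sum of pyGetD over an in-bounds range [lo,hi) = take hi − take lo, as sums.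
theorem pv_sum_range (distance : List Int) (lo hi : Int)
    (h0 : 0 ≤ lo) (h1 : lo ≤ hi) (h2 : hi ≤ distance.length) :
    ((PySem.List.pyRange lo hi 1).map (fun i => PySem.List.pyGetD distance i 0)).sum
      = (distance.take hi.toNat).sum - (distance.take lo.toNat).sum := by
  have hhi : (0 : Int) ≤ hi := le_trans h0 h1
  have hsplit := PySem.List.pyRange_one_append lo hi (distance.length : Int) h1 h2
  have hA : (PySem.List.pyRange lo (distance.length : Int) 1).map
      (fun i => PySem.List.pyGetD distance i 0) = distance.drop lo.toNat :=
    PySem.List.map_pyGetD_pyRange' distance 0 h0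
  have hB : (PySem.List.pyRange hi (distance.length : Int) 1).map
      (fun i => PySem.List.pyGetD distance i 0) = distance.drop hi.toNat :=
    PySem.List.map_pyGetD_pyRange' distance 0 hhi
  have hsum : ((PySem.List.pyRange lo hi 1).map (fun i => PySem.List.pyGetD distance i 0)).sum
      + (distance.drop hi.toNat).sum = (distance.drop lo.toNat).sum := by
    rw [← hA, ← hB, hsplit]; simp
  have hlo : (distance.take lo.toNat).sum + (distance.drop lo.toNat).sum = distance.sum := by
    rw [← List.sum_append, List.take_append_drop]
  have hhi' : (distance.take hi.toNat).sum + (distance.drop hi.toNat).sum = distance.sum := by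
    rw [← List.sum_append, List.take_append_drop]
  omega

-- ===== VERDICT (by name: the statement is the Claim_ definition above) =====
theorem distanceBetweenBusStops_spec : Claim_equal_distanceBetweenBusStops := by
  intro distance start destination _ hpre
  rcases hpre with ⟨h0, h1⟩ | ⟨heq, hb1, hb2⟩
  case inr =>
    subst heq
    unfold Spec_distanceBetweenBusStops distanceBetweenBusStops distanceBetweenBusStops_alt
    simp only [pv_foldl_add, zero_add, pv_prefix, gt_iff_lt, lt_irrefl, if_false, min_self,
      max_self, sub_self]
    have hrange : PySem.List.pyRange start start 1 = [] := by
      rw [PySem.List.pyRange_one]; simp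
    have hall : ((PySem.List.pyRange 0 (distance.length : Int) 1).map
        (fun i => PySem.List.pyGetD distance i 0)).sum = distance.sum := by
      rw [PySem.List.map_pyGetD_pyRange_zero']
    have hget_last : PySem.List.pyGetD
        ((List.range (distance.length + 1)).map (fun k => (distance.take k).sum)) (-1) 0
        = distance.sum := by
      rw [PySem.List.pyGetD_neg_ofNat _ 1 0 (by omega) (by simp)]
      simp
    rw [hrange, hall, hget_last]
    simp
  unfold Spec_distanceBetweenBusStops distanceBetweenBusStops distanceBetweenBusStops_alt
  simp only [pv_foldl_add, zero_add, pv_prefix]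
  have hall : ((PySem.List.pyRange 0 (distance.length : Int) 1).map
      (fun i => PySem.List.pyGetD distance i 0)).sum = distance.sum := by
    rw [PySem.List.map_pyGetD_pyRange_zero']
  have hlolt : 0 ≤ min start destination := h0
  have hhile : max start destination ≤ (distance.length : Int) := h1
  have hlohi : min start destination ≤ max start destination := min_le_max
  have hget_lo := pv_prefix_get distance (min start destination) (by omega) (by omega)
  have hget_hi := pv_prefix_get distance (max start destination) (by omega) (by omega)
  have hget_last : PySem.List.pyGetD
      ((List.range (distance.length + 1)).map (fun k => (distance.take k).sum)) (-1) 0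
      = distance.sum := by
    have hlen : ((List.range (distance.length + 1)).map
        (fun k => (distance.take k).sum)).length = distance.length + 1 := by simp
    rw [PySem.List.pyGetD_neg_ofNat _ 1 0 (by omega) (by omega)]
    simp
  rw [hall, hget_lo, hget_hi, hget_last]
  by_cases h : start > destination
  · have hle : ¬ start ≤ destination := by omega
    have hmin : min start destination = destination := by omega
    have hmax : max start destination = start := by omega
    simp only [h, if_true]
    rw [PySem.List.pyRange_neg_one_eq_reverse]
    have e1 : destination - 1 + 1 = destination := by ring
    have e2 : start - 1 + 1 = start := by ring
    rw [e1, e2, List.map_reverse, List.sum_reverse,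
        pv_sum_range distance destination start (by omega) (by omega) (by omega), hmin, hmax]
  · have hle : start ≤ destination := by omega
    have hmin : min start destination = start := by omega
    have hmax : max start destination = destination := by omega
    simp only [h, if_false]
    rw [pv_sum_range distance start destination (by omega) (by omega) (by omega), hmin, hmax]
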